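-- pv_equiv track=rewrite | github.com/MelekZmerli/foobar-google-challenge | level_2/Power Hungry/solution.py | solution
-- ===== SOURCE A (Python) =====
-- def solution(xs):
--     if len(xs) == 1: # if array contains one element, return its value
--         return str(xs[0])
--
--     active = [panel for panel in xs if panel != 0] # Remove panels with no power
--     negative = [panel for panel in active if panel < 0] # Extract panels w/ negative power
--
--     if len(negative)%2 != 0: # Applying 'trick' when odd number of panels with negative power
--         negative.sort()
--         active.remove(negative[-1]) # Remove panel with least negative power
--
--     if not active: # if array contains only one negative panel and panels w/o power
--         return '0'
--
--     power = 1
--     for panel in active: # Multiplying power of final panels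
--         power *= panel
--     return str(power)
-- ===== SOURCE B (Python) =====
-- def solution(xs):
--     if len(xs) == 1: # if array contains one element, return its value
--         return str(xs[0])
--     prod = 1
--     count = 0
--     neg = 0
--     max_neg = None
--     for x in xs:
--         if x == 0:
--             continue
--         prod *= x
--         count += 1
--         if x < 0:
--             neg += 1
--             if max_neg is None or max_neg < x:
--                 max_neg = x
--     if count == 0:
--         return '0'
--     if neg % 2 != 0:
--         if count == 1:
--             return '0'
--         prod //= max_neg
--     return str(prod)
-- ===== Notes on version B (the rewrite author's own statement) =====
-- stated objective: alternative
-- what changed: Replaces A's two list comprehensions + sort + list.remove + multiply loop with a single pass that keeps a running product, nonzero/negative counts and the running maximum negative, then divides out that one factor when the negative count is odd.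
import Mathlib
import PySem

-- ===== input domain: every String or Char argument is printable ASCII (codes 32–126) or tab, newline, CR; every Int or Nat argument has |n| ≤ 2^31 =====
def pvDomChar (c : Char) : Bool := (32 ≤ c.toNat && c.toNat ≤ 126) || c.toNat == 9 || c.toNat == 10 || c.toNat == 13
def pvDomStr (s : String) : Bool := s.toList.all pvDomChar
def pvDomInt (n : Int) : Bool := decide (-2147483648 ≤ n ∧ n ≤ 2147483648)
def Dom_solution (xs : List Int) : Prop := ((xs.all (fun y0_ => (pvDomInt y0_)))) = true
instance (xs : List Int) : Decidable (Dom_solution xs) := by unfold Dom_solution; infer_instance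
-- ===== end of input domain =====

-- B replaces A's two comprehensions + sort + remove + multiply loop by one scan
-- (running product, counts, running max negative) plus a final exact division; alternative decomposition, same result.


-- ===== PORT A =====
def solution (xs : List Int) : String :=
  if xs.length = 1 then
    match PySem.List.pyGet? xs 0 with    -- xs[0]; in range since len = 1
    | some v => PySem.Int.toStr v
    | none => ""                          -- unreachable under the guard
  else
    let active := xs.filter (fun p => decide (p ≠ 0))
    let negative := active.filter (fun p => decide (p < 0))
    let active' :=
      if negative.length % 2 ≠ 0 then
        -- negative.sort(); active.remove(negative[-1])
        let sortedNeg := PySem.List.sorted negative (fun x => x) false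
        -- negative[-1] then active.remove(...): both always succeed here
        ((PySem.List.pyGet? sortedNeg (-1)).bind
          (fun m => PySem.List.remove? active m)).getD active
      else active
    if active' = [] then "0"
    else PySem.Int.toStr (active'.foldl (fun power panel => power * panel) 1)

-- ===== PORT B =====
-- loop body of Source B: state (prod, count, neg, max_neg)
def solStep (s : Int × Int × Int × Option Int) (x : Int) : Int × Int × Int × Option Int :=
  if x = 0 then s
  else
    ⟨s.1 * x, s.2.1 + 1,
     if x < 0 then s.2.2.1 + 1 else s.2.2.1,
     if x < 0 then
       (match s.2.2.2 with
        | none => some x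
        | some y => if y < x then some x else some y)
     else s.2.2.2⟩

def solution_alt (xs : List Int) : String :=
  if xs.length = 1 then
    match PySem.List.pyGet? xs 0 with
    | some v => PySem.Int.toStr v
    | none => ""
  else
    let r := xs.foldl solStep (1, 0, 0, none)
    if r.2.1 = 0 then "0"
    else if PySem.Int.mod r.2.2.1 2 ≠ 0 then
      if r.2.1 = 1 then "0"
      else PySem.Int.toStr (PySem.Int.floordiv r.1 (r.2.2.2.getD 1))  -- max_neg is some _ here
    else PySem.Int.toStr r.1

-- ===== PRECONDITION & SPEC =====
def Spec_solution (xs : List Int) (out : String) : Prop := out = solution_alt xs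
instance (xs : List Int) (out : String) : Decidable (Spec_solution xs out) := by unfold Spec_solution; infer_instance

-- ===== CLAIM (what is proved, stated in full; the proofs are below) =====
def Claim_equal_solution : Prop := ∀ (xs : List Int), Dom_solution xs → Spec_solution xs (solution xs)

-- ===== LEMMAS AND PROOFS =====

-- running-max step on Option, as in solStep
def mOpt (m : Option Int) (x : Int) : Option Int :=
  match m with
  | none => some x
  | some y => if y < x then some x else some y

lemma foldl_mOpt_some (t : List Int) (a : Int) :
    t.foldl mOpt (some a) = some (t.foldl max a) := by
  induction t generalizing a with
  | nil => rfl
  | cons x t ih =>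
    simp only [List.foldl]
    have : mOpt (some a) x = some (max a x) := by
      simp only [mOpt]
      rcases lt_or_ge a x with h | h
      · rw [if_pos h, max_eq_right h.le]
      · rw [if_neg (not_lt.mpr h), max_eq_left h]
    rw [this, ih]

-- the single scan computes product/length of the nonzero sublist, length and running max of the negatives
lemma solStep_foldl (xs : List Int) (p c n : Int) (m : Option Int) :
    xs.foldl solStep (p, c, n, m) =
      (p * (xs.filter (fun x => decide (x ≠ 0))).prod,
       c + (xs.filter (fun x => decide (x ≠ 0))).length,
       n + (xs.filter (fun x => decide (x < 0))).length,
       (xs.filter (fun x => decide (x < 0))).foldl mOpt m) := by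
  induction xs generalizing p c n m with
  | nil => simp
  | cons x t ih =>
    by_cases hx : x = 0
    · subst hx
      simp only [List.foldl, solStep, List.filter_cons]
      norm_num [ih]
    · by_cases hneg : x < 0
      · simp only [List.foldl, List.filter_cons, hx, hneg, decide_true, ne_eq,
          not_false_iff, ite_true, List.prod_cons, List.length_cons]
        rw [show solStep (p, c, n, m) x = (p * x, c + 1, n + 1, mOpt m x) from by
          simp [solStep, hx, hneg, mOpt]]
        rw [ih]
        exact Prod.ext (by ring) (Prod.ext (by push_cast; ring) (Prod.ext (by push_cast; ring) rfl))
      · simp only [List.foldl, List.filter_cons, hx, hneg, decide_true, decide_false, ne_eq,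
          not_false_iff, ite_true, ite_false, Bool.false_eq_true, List.prod_cons, List.length_cons]
        rw [show solStep (p, c, n, m) x = (p * x, c + 1, n, m) from by
          simp [solStep, hx, hneg]]
        rw [ih]
        exact Prod.ext (by ring) (Prod.ext (by push_cast; ring) rfl)

-- in a ≤-sorted nonempty list every element is ≤ the last one
lemma le_getLast_of_pairwise (l : List Int) (hl : l.Pairwise (· ≤ ·)) (h : l ≠ []) :
    ∀ y ∈ l, y ≤ l.getLast h := by
  induction l with
  | nil => simp
  | cons a t ih =>
    intro y hy
    cases t with
    | nil => simp at hy; simp [hy, List.getLast]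
    | cons b t' =>
      rw [List.getLast_cons (by simp)]
      rcases List.mem_cons.mp hy with rfl | hy'
      · have hab : ∀ z ∈ b :: t', y ≤ z := (List.pairwise_cons.mp hl).1
        exact le_trans (hab b (by simp))
          (ih (List.pairwise_cons.mp hl).2 (by simp) b (by simp))
      · exact ih (List.pairwise_cons.mp hl).2 (by simp) y hy'

lemma filter_filter_neg (xs : List Int) :
    (xs.filter (fun p => decide (p ≠ 0))).filter (fun p => decide (p < 0)) =
      xs.filter (fun p => decide (p < 0)) := by
  rw [List.filter_filter]
  apply List.filter_congr
  intro a _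
  by_cases h : a < 0
  · simp [h, show a ≠ 0 by omega]
  · simp [h]

-- the running max over a nonempty list equals the last element of its sorted version
lemma foldl_mOpt_eq_sorted_last (l : List Int) (h : l ≠ []) :
    l.foldl mOpt none =
      some ((PySem.List.sorted l (fun x => x) false).getLast
        (by simpa [PySem.List.sorted_eq_nil_iff] using h)) := by
  obtain ⟨a, t, rfl⟩ := List.exists_cons_of_ne_nil h
  rw [show ((a :: t).foldl mOpt none) = t.foldl mOpt (some a) from rfl, foldl_mOpt_some]
  congr 1
  set s := PySem.List.sorted (a :: t) (fun x : Int => x) false with hs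
  have hsne : s ≠ [] := by simp [hs, PySem.List.sorted_eq_nil_iff, h]
  have hperm : s.Perm (a :: t) := PySem.List.sorted_perm _ _ _
  have hpair : s.Pairwise (· ≤ ·) := by
    simpa using PySem.List.sorted_pairwise (xs := a :: t) (key := fun x : Int => x)
  -- M := running max; show last s = M by antisymmetry
  have hMmem : t.foldl max a ∈ a :: t := by
    rcases PySem.List.foldl_max_mem t a with h' | h'
    · rw [h']; simp
    · exact List.mem_cons_of_mem _ h'
  have hMge : ∀ y ∈ a :: t, y ≤ t.foldl max a := by
    intro y hy
    rcases List.mem_cons.mp hy with rfl | hy'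
    · exact (PySem.List.le_foldl_max t y).1
    · exact (PySem.List.le_foldl_max t a).2 y hy'
  have h1 : s.getLast hsne ≤ t.foldl max a :=
    hMge _ (hperm.mem_iff.mp (List.getLast_mem hsne))
  have h2 : t.foldl max a ≤ s.getLast hsne :=
    le_getLast_of_pairwise s hpair hsne _ (hperm.mem_iff.mpr hMmem)
  exact le_antisymm h2 h1

-- first-occurrence removal lemma specialised to our use
lemma floordiv_mul_cancel (a b : Int) (h : a ≠ 0) : PySem.Int.floordiv (a * b) a = b := by
  simp [PySem.Int.floordiv, Int.mul_fdiv_cancel_left _ h]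

lemma pyGet?_neg_one_getLast (xs : List Int) (h : xs ≠ []) :
    PySem.List.pyGet? xs (-1) = some (xs.getLast h) := by
  have hl : 0 < xs.length := List.length_pos_iff.mpr h
  rw [PySem.List.pyGet?_neg_ofNat xs 1 (by omega) (by omega)]
  rw [List.getElem?_eq_getElem (by omega)]
  simp [List.getLast_eq_getElem]

lemma mod_two_natCast (n : Nat) : PySem.Int.mod (0 + (n : Int)) 2 = ((n % 2 : Nat) : Int) := by
  rw [zero_add]
  exact_mod_cast PySem.Int.mod_natCast n 2

-- ===== VERDICT (by name: the statement is the Claim_ definition above) =====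
theorem solution_spec : Claim_equal_solution := by
  intro xs _
  unfold Spec_solution solution solution_alt
  by_cases hlen : xs.length = 1
  · simp only [if_pos hlen]
  · simp only [if_neg hlen]
    rw [solStep_foldl]
    dsimp only
    rw [filter_filter_neg]
    set A := xs.filter (fun p => decide (p ≠ 0)) with hA
    set N := xs.filter (fun p => decide (p < 0)) with hN
    by_cases hA0 : A = []
    · have hN0 : N = [] := by
        have h := (filter_filter_neg xs).symm
        rw [← hA, ← hN, hA0] at h
        simpa using h
      simp [hA0, hN0]
    · have hAlen : 0 < A.length := List.length_pos_iff.mpr hA0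
      have hc0 : ¬((0 : Int) + (A.length : Int) = 0) := by omega
      by_cases hpar : N.length % 2 = 0
      · -- even number of negatives: no removal on either side
        have hmod : PySem.Int.mod (0 + (N.length : Int)) 2 = 0 := by
          rw [mod_two_natCast, hpar]; rfl
        rw [if_neg (show ¬(N.length % 2 ≠ 0) by omega), if_neg hA0, if_neg hc0,
          if_neg (not_not_intro hmod),
          ← List.prod_eq_foldl, one_mul]
      · -- odd number of negatives: A removes the sorted list's last, B divides by the running max
        have hNne : N ≠ [] := by
          intro h; rw [h] at hpar; exact hpar rfl
        have hsne : PySem.List.sorted N (fun x : Int => x) false ≠ [] := by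
          simpa [PySem.List.sorted_eq_nil_iff] using hNne
        set M := (PySem.List.sorted N (fun x : Int => x) false).getLast hsne with hM
        have hget : PySem.List.pyGet? (PySem.List.sorted N (fun x : Int => x) false) (-1) =
            some M := pyGet?_neg_one_getLast _ hsne
        have hfold : N.foldl mOpt none = some M := foldl_mOpt_eq_sorted_last N hNne
        have hMN : M ∈ N :=
          (PySem.List.sorted_perm N (fun x : Int => x) false).mem_iff.mp (List.getLast_mem hsne)
        have hMfilter : M ∈ xs.filter (fun p => decide (p < 0)) := hMN
        have hMneg : M < 0 := by simpa using (List.mem_filter.mp hMfilter).2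
        have hMA : M ∈ A := by
          rcases List.mem_filter.mp hMfilter with ⟨hmx, _⟩
          exact List.mem_filter.mpr ⟨hmx, by simp; omega⟩
        have hM0 : M ≠ 0 := by omega
        have hrem : PySem.List.remove? A M = some (A.erase M) :=
          PySem.List.remove?_eq_some_erase A M hMA
        have hmod : PySem.Int.mod (0 + (N.length : Int)) 2 ≠ 0 := by
          rw [mod_two_natCast]
          omega
        rw [if_pos (show N.length % 2 ≠ 0 by omega), hget]
        rw [show (some M).bind (fun m => PySem.List.remove? A m) = PySem.List.remove? A M from
          rfl]
        rw [hrem, hfold, Option.getD_some, Option.getD_some]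
        rw [if_neg hc0, if_pos hmod]
        by_cases hA1 : A.length = 1
        · -- the single nonzero panel is the lone negative: both sides return "0"
          obtain ⟨a, ha⟩ := List.length_eq_one_iff.mp hA1
          have hMa : M = a := by rw [ha] at hMA; simpa using hMA
          rw [if_pos (show A.erase M = [] by rw [ha, hMa]; simp),
            if_pos (show (0 : Int) + (A.length : Int) = 1 by omega)]
        · have herase : A.erase M ≠ [] := by
            intro h
            have hle := List.length_erase_of_mem hMA
            rw [h] at hle
            simp at hle
            omega
          rw [if_neg herase, if_neg (show ¬((0 : Int) + (A.length : Int) = 1) by omega),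
            ← List.prod_eq_foldl, one_mul, ← List.prod_erase hMA, floordiv_mul_cancel _ _ hM0]
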